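-- pv_equiv track=rewrite | github.com/momo609/mindspeed | mindspeed/multi_modal/conv3d/conv3d_depth_parallel.py | get_range_list_of_3dshape
-- ===== SOURCE A (Python) =====
-- def get_range_list_of_3dshape(dim_size, world_size, kernel_size, stride):
--     def find_last_le_k(arr, k):
--         return max((element for element in arr if element < k), default=arr[-1])
--
--     def find_first_ge_k(arr, k):
--         return next((element for element in arr if element >= k), arr[-1])
--
--     range_list = []
--     stride_index = [i for i in range(0, dim_size, stride)]
--     for rank in range(world_size):
--         depth_per_sp = dim_size // world_size
--         start_idx = find_first_ge_k(stride_index, rank * depth_per_sp)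
--         last_idx = find_last_le_k(stride_index, (rank + 1) * depth_per_sp) + 1
--         end_idx = last_idx + kernel_size - 1 if rank < world_size - 1 else dim_size
--
--         range_list.append([start_idx, end_idx])
--     return range_list
-- ===== SOURCE B (Python) =====
-- def get_range_list_of_3dshape(dim_size, world_size, kernel_size, stride):
--     # Closed-form O(world_size): the stride grid is {0, s, 2s, ...} below dim_size,
--     # so first-multiple >= k and last-multiple < k are ceil/floor divisions, clamped
--     # to the largest grid point.
--     if world_size <= 0:
--         return []
--     depth = dim_size // world_size
--     last = stride * ((dim_size - 1) // stride)  # largest grid point (< dim_size)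
--     out = []
--     for rank in range(world_size):
--         k1 = rank * depth
--         start = min(stride * (-((-k1) // stride)), last)  # first grid point >= k1, clamped
--         k2 = (rank + 1) * depth
--         lastle = min(stride * ((k2 - 1) // stride), last) if k2 >= 1 else last
--         end = lastle + kernel_size if rank < world_size - 1 else dim_size
--         out.append([start, end])
--     return out
-- ===== Notes on version B (the rewrite author's own statement) =====
-- stated objective: faster
-- what changed: A rebuilds the full stride grid and linearly scans it twice per rank; B computes each rank's first-grid-point->= and last-grid-point-< via closed-form ceiling/floor division clamped to the largest grid point, never materialising the grid.
-- outside the precondition, e.g. on get_range_list_of_3dshape(-2, 1, 1, -2): A returns [[0, -2]], B returns [[-2, -2]]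
import Mathlib
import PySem

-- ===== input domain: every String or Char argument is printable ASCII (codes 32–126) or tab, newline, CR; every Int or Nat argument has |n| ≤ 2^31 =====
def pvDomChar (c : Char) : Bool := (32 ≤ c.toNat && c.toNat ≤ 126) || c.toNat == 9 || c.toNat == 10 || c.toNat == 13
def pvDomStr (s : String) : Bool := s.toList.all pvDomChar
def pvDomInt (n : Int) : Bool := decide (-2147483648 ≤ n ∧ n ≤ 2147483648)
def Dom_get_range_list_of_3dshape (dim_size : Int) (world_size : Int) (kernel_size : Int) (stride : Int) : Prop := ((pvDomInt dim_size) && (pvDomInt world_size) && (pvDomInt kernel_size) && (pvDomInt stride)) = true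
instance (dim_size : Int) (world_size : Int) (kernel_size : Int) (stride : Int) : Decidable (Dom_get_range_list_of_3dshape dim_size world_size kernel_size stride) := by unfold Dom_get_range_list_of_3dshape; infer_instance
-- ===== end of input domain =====

-- B replaces A's per-rank linear scans over the stride grid by closed-form ceil/floor
-- division with clamping: O(world_size) instead of O(world_size * dim_size / stride).


-- ===== PORT A =====
-- find_first_ge_k(arr, k): the default argument arr[-1] is evaluated eagerly (IndexError on
-- empty arr — excluded by Pre_, so the .getD 0 is never reached inside Pre_).
def pvFindFirstGe (arr : List Int) (k : Int) : Int :=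
  let dflt := (PySem.List.pyGet? arr (-1)).getD 0
  match arr.find? (fun e => decide (k ≤ e)) with
  | some e => e
  | none => dflt

-- find_last_le_k(arr, k): max over the elements < k, default arr[-1] (eager, as above).
def pvFindLastLe (arr : List Int) (k : Int) : Int :=
  PySem.List.maxD (arr.filter (fun e => decide (e < k))) (fun y => y)
    ((PySem.List.pyGet? arr (-1)).getD 0)

def get_range_list_of_3dshape (dim_size : Int) (world_size : Int) (kernel_size : Int) (stride : Int) : List (List Int) :=
  let stride_index := PySem.List.pyRange 0 dim_size stride
  (PySem.List.pyRange 0 world_size 1).foldl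
    (fun range_list rank =>
      let depth_per_sp := PySem.Int.floordiv dim_size world_size
      let start_idx := pvFindFirstGe stride_index (rank * depth_per_sp)
      let last_idx := pvFindLastLe stride_index ((rank + 1) * depth_per_sp) + 1
      let end_idx := if rank < world_size - 1 then last_idx + kernel_size - 1 else dim_size
      range_list ++ [[start_idx, end_idx]]) []

-- ===== PORT B =====
def get_range_list_of_3dshape_alt (dim_size : Int) (world_size : Int) (kernel_size : Int) (stride : Int) : List (List Int) :=
  if world_size ≤ 0 then []
  else
    let depth := PySem.Int.floordiv dim_size world_size
    let last := stride * PySem.Int.floordiv (dim_size - 1) stride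
    (PySem.List.pyRange 0 world_size 1).foldl
      (fun out rank =>
        let k1 := rank * depth
        let start := min (stride * (-(PySem.Int.floordiv (-k1) stride))) last
        let k2 := (rank + 1) * depth
        let lastle := if 1 ≤ k2 then min (stride * PySem.Int.floordiv (k2 - 1) stride) last else last
        let e := if rank < world_size - 1 then lastle + kernel_size else dim_size
        out ++ [[start, e]]) []

-- ===== PRECONDITION & SPEC =====
-- Pre_ excludes the inputs where A raises — stride = 0 (ValueError from range) and world_size ≥ 1
-- with an empty stride grid (IndexError at arr[-1]) — and, outside the function's natural 3D-shape
-- domain, the degenerate inputs with BOTH dim_size < 0 and stride < 0, where A scans a descending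
-- range of negative indices and returns accidental values.
def Pre_get_range_list_of_3dshape (dim_size : Int) (world_size : Int) (kernel_size : Int) (stride : Int) : Prop :=
  stride ≠ 0 ∧ (world_size ≤ 0 ∨ (1 ≤ dim_size ∧ 1 ≤ stride))
instance (dim_size : Int) (world_size : Int) (kernel_size : Int) (stride : Int) : Decidable (Pre_get_range_list_of_3dshape dim_size world_size kernel_size stride) := by unfold Pre_get_range_list_of_3dshape; infer_instance

def pvWitness_get_range_list_of_3dshape : Int × Int × Int × Int := (5, 2, 1, 2)

def Spec_get_range_list_of_3dshape (dim_size : Int) (world_size : Int) (kernel_size : Int) (stride : Int) (out : List (List Int)) : Prop := out = get_range_list_of_3dshape_alt dim_size world_size kernel_size stride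
instance (dim_size : Int) (world_size : Int) (kernel_size : Int) (stride : Int) (out : List (List Int)) : Decidable (Spec_get_range_list_of_3dshape dim_size world_size kernel_size stride out) := by unfold Spec_get_range_list_of_3dshape; infer_instance

-- ===== CLAIM (what is proved, stated in full; the proofs are below) =====
def Claim_equal_get_range_list_of_3dshape : Prop := ∀ (dim_size : Int) (world_size : Int) (kernel_size : Int) (stride : Int), Dom_get_range_list_of_3dshape dim_size world_size kernel_size stride → Pre_get_range_list_of_3dshape dim_size world_size kernel_size stride → Spec_get_range_list_of_3dshape dim_size world_size kernel_size stride (get_range_list_of_3dshape dim_size world_size kernel_size stride)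

-- ===== LEMMAS AND PROOFS =====

-- ceil division bracket: c := -((-k) // s) is ⌈k / s⌉
theorem pvCeilBracket {k s : Int} (hs : 0 < s) :
    (-(PySem.Int.floordiv (-k) s) - 1) * s < k ∧ k ≤ -(PySem.Int.floordiv (-k) s) * s :=
  (PySem.Int.neg_floordiv_neg_eq_iff_of_pos hs).mp rfl

theorem pvCeil_le_iff {k s : Int} (hs : 0 < s) (i : Int) :
    (k ≤ s * i ↔ -(PySem.Int.floordiv (-k) s) ≤ i) := by
  obtain ⟨h1, h2⟩ := pvCeilBracket (k := k) hs
  constructor <;> intro h <;> nlinarith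

theorem pvCeil_lt_iff {k s : Int} (hs : 0 < s) (i : Int) :
    (s * i < k ↔ i < -(PySem.Int.floordiv (-k) s)) := by
  have := pvCeil_le_iff (k := k) hs i
  omega

theorem pvCeil_nonneg {k s : Int} (hs : 0 < s) (hk : 0 ≤ k) :
    0 ≤ -(PySem.Int.floordiv (-k) s) := by
  obtain ⟨h1, h2⟩ := pvCeilBracket (k := k) (s := s) hs
  nlinarith

theorem pvFind?_range (c : Int) (hc : 0 ≤ c) (m : Nat) :
    ((List.range m).find? (fun i : Nat => decide (c ≤ (i : Int))) : Option Nat)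
      = if c < (m : Int) then some c.toNat else none := by
  induction m with
  | zero => rw [if_neg (by push_cast; omega)]; simp
  | succ m ih =>
    rw [List.range_succ, List.find?_append, ih]
    by_cases h : c < (m : Int)
    · rw [if_pos h, if_pos (by push_cast; omega)]
      simp
    · by_cases h2 : c ≤ (m : Int)
      · have hcm : c = (m : Int) := by omega
        rw [if_neg h, if_pos (by push_cast; omega)]
        simp [hcm]
      · rw [if_neg h, if_neg (by push_cast; omega)]
        simp
        omega

theorem pvFilter_range (t m : Nat) :
    (List.range m).filter (fun i => decide (i < t)) = List.range (min t m) := by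
  induction m with
  | zero => simp
  | succ m ih =>
    rw [List.range_succ, List.filter_append, ih]
    by_cases h : m < t
    · have hmin : min t (m + 1) = min t m + 1 := by omega
      rw [hmin, List.range_succ]
      simp [h]
      omega
    · have hmin : min t (m + 1) = min t m := by omega
      simp [h, hmin]

theorem pvLast_map_range (f : Nat → Int) (n : Nat) (hn : n ≠ 0) :
    ((List.range n).map f).getLast? = some (f (n - 1)) := by
  rw [List.getLast?_eq_getElem?]
  simp [Nat.sub_lt (Nat.pos_of_ne_zero hn) one_pos]

theorem pvMaxD_map_range (s dflt : Int) (hs : 0 ≤ s) (n : Nat) :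
    PySem.List.maxD ((List.range n).map (fun k : Nat => s * (k : Int))) (fun y => y) dflt
      = if n = 0 then dflt else s * ((n : Int) - 1) := by
  rcases Nat.eq_zero_or_pos n with hn | hn
  · simp [hn, PySem.List.maxD]
    have : PySem.List.max? ([] : List Int) (fun y => y) = none :=
      (PySem.List.max?_eq_none_iff _ _).mpr rfl
    simp [this]
  · rw [if_neg (by omega)]
    set xs : List Int := (List.range n).map (fun k : Nat => s * (k : Int)) with hxs
    have hne : xs ≠ [] := by
      intro h
      have := congrArg List.length h
      simp [hxs] at this
      omega
    obtain ⟨v, hv⟩ : ∃ v, PySem.List.max? xs (fun y : Int => y) = some v := by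
      cases h : PySem.List.max? xs (fun y : Int => y) with
      | none => exact absurd ((PySem.List.max?_eq_none_iff _ _).mp h) hne
      | some v => exact ⟨v, rfl⟩
    have hw : s * ((n : Int) - 1) ∈ xs := by
      simp [hxs]
      exact ⟨n - 1, by omega, by omega⟩
    have hvmem := PySem.List.max?_mem hv
    have hvmax := PySem.List.max?_isMax hv
    have hbound : ∀ y ∈ xs, y ≤ s * ((n : Int) - 1) := by
      intro y hy
      simp [hxs] at hy
      obtain ⟨k, hk, rfl⟩ := hy
      have : (k : Int) ≤ (n : Int) - 1 := by omega
      nlinarith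
    have := le_antisymm (hbound v hvmem) (hvmax _ hw)
    simp [PySem.List.maxD, hv, this]

-- the stride grid is the map of (s * ·) over List.range M, with M - 1 = (d-1) // s
theorem pvGrid (d s : Int) (hd : 1 ≤ d) (hs : 1 ≤ s) :
    ∃ M : Nat, 1 ≤ M ∧
      PySem.List.pyRange 0 d s = (List.range M).map (fun k : Nat => s * (k : Int)) ∧
      PySem.Int.floordiv (d - 1) s = (M : Int) - 1 := by
  have hs0 : (0 : Int) < s := by omega
  have hdiv : (d + s - 1) / s = (d - 1) / s + 1 := by
    have := Int.add_mul_ediv_right (d - 1) 1 (by omega : s ≠ 0)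
    rw [one_mul] at this
    rw [show d + s - 1 = d - 1 + s by ring, this]
  have h1 : 1 ≤ (d + s - 1) / s := by
    rw [Int.le_ediv_iff_mul_le hs0]
    omega
  refine ⟨((d + s - 1) / s).toNat, by omega, ?_, ?_⟩
  · rw [PySem.List.pyRange_of_pos 0 d hs0, if_pos (by omega : (0:Int) < d)]
    simp
  · rw [PySem.Int.floordiv_eq_ediv_of_pos hs0]
    omega

theorem pvDfltVal (s : Int) (M : Nat) (hM : 1 ≤ M) :
    ((PySem.List.pyGet? ((List.range M).map (fun k : Nat => s * (k : Int))) (-1)).getD 0)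
      = s * ((M : Int) - 1) := by
  rw [PySem.List.pyGet?_neg_one, pvLast_map_range _ M (by omega)]
  have : ((M - 1 : Nat) : Int) = (M : Int) - 1 := by omega
  simp [this]

theorem pvFirstGe_eq (d s k : Int) (hd : 1 ≤ d) (hs : 1 ≤ s) (hk : 0 ≤ k) :
    pvFindFirstGe (PySem.List.pyRange 0 d s) k
      = min (s * (-(PySem.Int.floordiv (-k) s))) (s * PySem.Int.floordiv (d - 1) s) := by
  have hs0 : (0 : Int) < s := by omega
  obtain ⟨M, hM, hL, hfd⟩ := pvGrid d s hd hs
  set c := -(PySem.Int.floordiv (-k) s) with hc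
  have hc0 : 0 ≤ c := pvCeil_nonneg hs0 hk
  have hpred : (fun i : Nat => decide (k ≤ s * (i : Int))) = (fun i : Nat => decide (c ≤ (i : Int))) := by
    funext i
    exact decide_eq_decide.mpr (pvCeil_le_iff hs0 (i : Int))
  unfold pvFindFirstGe
  rw [hL, pvDfltVal s M hM, List.find?_map, hfd]
  simp only [Function.comp_def]
  rw [hpred, pvFind?_range c hc0 M]
  by_cases h : c < (M : Int)
  · rw [if_pos h]
    simp only [Option.map_some]
    rw [Int.toNat_of_nonneg hc0]
    exact (min_eq_left (by nlinarith)).symm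
  · rw [if_neg h]
    simp only [Option.map_none]
    exact (min_eq_right (by nlinarith)).symm

theorem pvLastLe_eq (d s k : Int) (hd : 1 ≤ d) (hs : 1 ≤ s) (hk : 0 ≤ k) :
    pvFindLastLe (PySem.List.pyRange 0 d s) k
      = if 1 ≤ k then min (s * PySem.Int.floordiv (k - 1) s) (s * PySem.Int.floordiv (d - 1) s)
        else s * PySem.Int.floordiv (d - 1) s := by
  have hs0 : (0 : Int) < s := by omega
  obtain ⟨M, hM, hL, hfd⟩ := pvGrid d s hd hs
  set c := -(PySem.Int.floordiv (-k) s) with hc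
  have hc0 : 0 ≤ c := pvCeil_nonneg hs0 hk
  obtain ⟨hbr1, hbr2⟩ := pvCeilBracket (k := k) (s := s) hs0
  have hpred : (fun e : Int => decide (e < k)) ∘ (fun i : Nat => s * (i : Int))
      = (fun i : Nat => decide (i < c.toNat)) := by
    funext i
    simp only [Function.comp_def]
    refine decide_eq_decide.mpr ?_
    rw [pvCeil_lt_iff hs0 (i : Int), ← hc]
    omega
  unfold pvFindLastLe
  rw [hL, pvDfltVal s M hM, List.filter_map, hpred, pvFilter_range c.toNat M,
    pvMaxD_map_range s _ (by omega), hfd]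
  by_cases hk1 : 1 ≤ k
  · have hc1 : 1 ≤ c := by nlinarith
    have hn : ¬ (min c.toNat M = 0) := by omega
    rw [if_pos hk1, if_neg hn]
    have hfk : PySem.Int.floordiv (k - 1) s = c - 1 := by
      rw [PySem.Int.floordiv_eq_iff_of_pos hs0]
      constructor <;> nlinarith
    rw [hfk]
    have hcast : ((min c.toNat M : Nat) : Int) = min c (M : Int) := by omega
    rw [hcast]
    rcases le_total c (M : Int) with hcm | hcm
    · rw [min_eq_left hcm, min_eq_left (by nlinarith)]
    · rw [min_eq_right hcm, min_eq_right (by nlinarith)]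
  · have hk0 : k = 0 := by omega
    have hcz : c = 0 := by nlinarith
    have hn : min c.toNat M = 0 := by omega
    rw [if_neg hk1, if_pos hn]

-- ===== VERDICT (by name: the statement is the Claim_ definition above) =====
theorem get_range_list_of_3dshape_spec : Claim_equal_get_range_list_of_3dshape := by
  intro d ws ker s _ hpre
  obtain ⟨hs0, hcase⟩ := hpre
  unfold Spec_get_range_list_of_3dshape get_range_list_of_3dshape get_range_list_of_3dshape_alt
  by_cases hws : ws ≤ 0
  · simp [hws, PySem.List.pyRange_one_eq_nil (by omega : ws ≤ 0)]
  · have hws1 : 1 ≤ ws := by omega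
    obtain ⟨hd, hs⟩ : 1 ≤ d ∧ 1 ≤ s := by tauto
    simp only [if_neg hws]
    rw [PySem.List.foldl_append_singleton_eq_map, PySem.List.foldl_append_singleton_eq_map]
    simp only [List.nil_append]
    apply List.map_congr_left
    intro rank hrank
    rw [PySem.List.mem_pyRange_one] at hrank
    have hdepth : 0 ≤ PySem.Int.floordiv d ws := by
      rw [PySem.Int.floordiv_eq_ediv_of_pos (by omega)]
      exact Int.ediv_nonneg (by omega) (by omega)
    have hk1 : 0 ≤ rank * PySem.Int.floordiv d ws := mul_nonneg (by omega) hdepth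
    have hk2 : 0 ≤ (rank + 1) * PySem.Int.floordiv d ws := mul_nonneg (by omega) hdepth
    rw [pvFirstGe_eq d s _ hd hs hk1, pvLastLe_eq d s _ hd hs hk2]
    by_cases hlast : rank < ws - 1
    · simp only [if_pos hlast]
      by_cases hk2' : 1 ≤ (rank + 1) * PySem.Int.floordiv d ws <;> simp [hk2'] <;> ring_nf
    · simp [hlast]
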